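-- pv_equiv track=rewrite | github.com/monsegard/portfolio | IM/кудряшов/Кр2/шифры/caesar.py | ofb_decrypt
-- ===== SOURCE A (Python) =====
-- def encrypt(c, key, l):
--     return (c + key) % l
--
-- def ofb_decrypt(data, key, iv, l=256):
--     cypher_data = []
--     for m in data:
--         c = encrypt(iv, key, l)
--         iv = c
--         m = m ^ iv
--         cypher_data.append(m)
--     return cypher_data
-- ===== SOURCE B (Python) =====
-- def ofb_decrypt(data, key, iv, l=256):
--     # Closed-form keystream: element i is XORed with (iv + (i+1)*key) % l;
--     # no mutable iv accumulator, no encrypt helper.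
--     return [m ^ ((iv + (i + 1) * key) % l) for i, m in enumerate(data)]
-- ===== Notes on version B (the rewrite author's own statement) =====
-- stated objective: alternative
-- what changed: Replaces the stateful loop that repeatedly advances iv through the encrypt helper with a direct comprehension computing each keystream value in closed form from its index, (iv + (i+1)*key) % l.
import Mathlib
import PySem

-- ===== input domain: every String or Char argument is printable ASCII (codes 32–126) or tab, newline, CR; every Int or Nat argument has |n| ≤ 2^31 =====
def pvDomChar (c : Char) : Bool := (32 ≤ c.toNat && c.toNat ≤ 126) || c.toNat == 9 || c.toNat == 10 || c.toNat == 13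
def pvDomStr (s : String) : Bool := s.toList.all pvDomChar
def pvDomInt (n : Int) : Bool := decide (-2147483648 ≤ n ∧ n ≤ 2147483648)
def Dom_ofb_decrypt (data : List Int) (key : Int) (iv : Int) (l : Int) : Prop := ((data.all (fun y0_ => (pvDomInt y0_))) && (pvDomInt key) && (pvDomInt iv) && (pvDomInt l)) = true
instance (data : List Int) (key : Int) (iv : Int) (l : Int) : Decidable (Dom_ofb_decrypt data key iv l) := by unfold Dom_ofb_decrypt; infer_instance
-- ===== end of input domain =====

-- B replaces A's stateful iv-accumulator loop with an index-based closed-form keystream; alternative decomposition, same O(n) cost.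


-- ===== PORT A =====
def encrypt (c : Int) (key : Int) (l : Int) : Int := PySem.Int.mod (c + key) l

def ofb_decrypt (data : List Int) (key : Int) (iv : Int) (l : Int) : List Int :=
  (data.foldl (fun (st : Int × List Int) m =>
      let c := encrypt st.1 key l
      (c, st.2 ++ [PySem.Int.bxor m c])) (iv, ([] : List Int))).2

-- ===== PORT B =====
def ofb_decrypt_alt (data : List Int) (key : Int) (iv : Int) (l : Int) : List Int :=
  (PySem.List.enumerate data 0).map
    (fun p => PySem.Int.bxor p.2 (PySem.Int.mod (iv + (p.1 + 1) * key) l))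

-- ===== PRECONDITION & SPEC =====
-- Pre_ excludes only inputs on which Python A raises ZeroDivisionError (l = 0 with nonempty data).
def Pre_ofb_decrypt (data : List Int) (key : Int) (iv : Int) (l : Int) : Prop := data = [] ∨ l ≠ 0
instance (data : List Int) (key : Int) (iv : Int) (l : Int) : Decidable (Pre_ofb_decrypt data key iv l) := by unfold Pre_ofb_decrypt; infer_instance

def pvWitness_ofb_decrypt : List Int × Int × Int × Int := ([1, 2, 3], 5, 7, 256)

def Spec_ofb_decrypt (data : List Int) (key : Int) (iv : Int) (l : Int) (out : List Int) : Prop := out = ofb_decrypt_alt data key iv l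
instance (data : List Int) (key : Int) (iv : Int) (l : Int) (out : List Int) : Decidable (Spec_ofb_decrypt data key iv l out) := by unfold Spec_ofb_decrypt; infer_instance

-- ===== CLAIM (what is proved, stated in full; the proofs are below) =====
def Claim_equal_ofb_decrypt : Prop := ∀ (data : List Int) (key : Int) (iv : Int) (l : Int), Dom_ofb_decrypt data key iv l → Pre_ofb_decrypt data key iv l → Spec_ofb_decrypt data key iv l (ofb_decrypt data key iv l)

-- ===== LEMMAS AND PROOFS =====

-- Reducing mod l first does not change the result of a later shifted mod (holds for every l; fmod _ 0 = id).
theorem pv_mod_shift (a k l : Int) :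
    PySem.Int.mod (PySem.Int.mod a l + k) l = PySem.Int.mod (a + k) l := by
  show ((a.fmod l) + k).fmod l = (a + k).fmod l
  conv_rhs => rw [← Int.fmod_add_mul_fdiv a l]
  rw [add_right_comm, Int.add_mul_fmod_self_left]

-- Loop invariant: A's fold from state (iv, acc), matched against B's closed form with index origin s.
theorem pv_loop (key l : Int) : ∀ (ms : List Int) (iv : Int) (acc : List Int) (s : Int),
    (ms.foldl (fun (st : Int × List Int) m =>
        let c := encrypt st.1 key l
        (c, st.2 ++ [PySem.Int.bxor m c])) (iv, acc)).2
      = acc ++ (PySem.List.enumerate ms s).map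
          (fun p => PySem.Int.bxor p.2 (PySem.Int.mod (iv + (p.1 - s + 1) * key) l)) := by
  intro ms
  induction ms with
  | nil => intro iv acc s; simp [PySem.List.enumerate_nil]
  | cons m ms ih =>
    intro iv acc s
    rw [List.foldl_cons, PySem.List.enumerate_cons]
    simp only [List.map_cons]
    rw [ih (encrypt iv key l) (acc ++ [PySem.Int.bxor m (encrypt iv key l)]) (s + 1)]
    rw [List.append_assoc]
    congr 1
    · simp only [List.singleton_append, List.cons.injEq]
      constructor
      · have : iv + (s - s + 1) * key = iv + key := by ring
        simp [encrypt, this]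
      · apply List.map_congr_left
        intro p _
        congr 1
        have h1 : encrypt iv key l + (p.1 - (s + 1) + 1) * key
            = PySem.Int.mod (iv + key) l + (p.1 - (s + 1) + 1) * key := rfl
        rw [h1, pv_mod_shift]
        congr 1
        ring

-- ===== VERDICT (by name: the statement is the Claim_ definition above) =====
theorem ofb_decrypt_spec : Claim_equal_ofb_decrypt := by
  intro data key iv l _ _
  show ofb_decrypt data key iv l = ofb_decrypt_alt data key iv l
  unfold ofb_decrypt ofb_decrypt_alt
  rw [pv_loop key l data iv [] 0, List.nil_append]
  apply List.map_congr_left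
  intro p _
  have : p.1 - 0 + 1 = p.1 + 1 := by ring
  rw [this]
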